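-- pv_equiv track=rewrite | github.com/jakeOmega/Vic3TimelineExtended | scripts/format_paradox_tabs.py | _code_portion
-- ===== SOURCE A (Python) =====
-- def _code_portion(line: str) -> str:
--     in_string = False
--     escaped = False
--     result: list[str] = []
--
--     for char in line:
--         if in_string:
--             if escaped:
--                 escaped = False
--             elif char == "\\":
--                 escaped = True
--             elif char == '"':
--                 in_string = False
--             result.append(" ")
--             continue
--
--         if char == '"':
--             in_string = True
--             result.append(" ")
--             continue
--
--         if char == "#":
--             break
--
--         result.append(char)
--
--     return "".join(result)
-- ===== SOURCE B (Python) =====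
-- def _code_portion(line: str) -> str:
--     # Skip-ahead rewrite: on a quote, scan the whole string literal at once and
--     # emit that many spaces; on '#', stop; otherwise copy the character.
--     out = []
--     i = 0
--     n = len(line)
--     while i < n:
--         c = line[i]
--         if c == '"':
--             j = i + 1
--             while j < n:
--                 if line[j] == '\\':
--                     j += 2
--                 elif line[j] == '"':
--                     j += 1
--                     break
--                 else:
--                     j += 1
--             j = min(j, n)
--             out.append(' ' * (j - i))
--             i = j
--         elif c == '#':
--             break
--         else:
--             out.append(c)
--             i += 1
--     return ''.join(out)
-- ===== Notes on version B (the rewrite author's own statement) =====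
-- stated objective: alternative
-- what changed: Replaces the per-character boolean state machine (in_string/escaped flags) with a skip-ahead tokenizer: on a quote it scans the whole string literal in one inner loop and emits that many spaces at once.
import Mathlib
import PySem

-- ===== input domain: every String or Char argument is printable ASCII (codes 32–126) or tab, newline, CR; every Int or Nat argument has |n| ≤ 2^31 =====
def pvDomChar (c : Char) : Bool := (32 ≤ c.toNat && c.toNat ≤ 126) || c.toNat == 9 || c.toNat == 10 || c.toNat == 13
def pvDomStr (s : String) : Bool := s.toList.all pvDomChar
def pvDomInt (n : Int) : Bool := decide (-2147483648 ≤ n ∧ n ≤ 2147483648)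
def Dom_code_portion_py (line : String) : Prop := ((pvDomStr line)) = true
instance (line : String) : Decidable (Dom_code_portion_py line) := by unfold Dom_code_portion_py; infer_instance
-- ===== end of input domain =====

-- ===== PORT A =====
-- B changes nothing observable: A's per-character flag state machine is replaced by a skip-ahead string-literal scanner.
def pvGoA : List Char → Bool → Bool → List Char → List Char
  | [], _, _, acc => acc
  | c :: rest, inS, esc, acc =>
    if inS then
      if esc then pvGoA rest true false (acc ++ [' '])
      else if c = '\\' then pvGoA rest true true (acc ++ [' '])
      else if c = '"' then pvGoA rest false false (acc ++ [' '])
      else pvGoA rest true false (acc ++ [' '])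
    else if c = '"' then pvGoA rest true false (acc ++ [' '])
    else if c = '#' then acc
    else pvGoA rest false false (acc ++ [c])

def code_portion_py (line : String) : String :=
  String.ofList (pvGoA line.toList false false [])

-- ===== PORT B =====
-- inner while loop of Source B: chars after an opening quote ↦ (number of chars in the
-- literal body including a closing quote if present, remaining chars)
def pvScanB : List Char → Nat × List Char
  | [] => (0, [])
  | c :: rest =>
    if c = '\\' then
      match rest with
      | [] => (1, [])
      | _ :: rest' => let p := pvScanB rest'; (p.1 + 2, p.2)
    else if c = '"' then (1, rest)
    else let p := pvScanB rest; (p.1 + 1, p.2)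

-- needed by pvGoB's termination proof (cited in decreasing_by)
theorem pvScanB_len : ∀ (l : List Char), (pvScanB l).2.length ≤ l.length := by
  intro l
  induction l using pvScanB.induct with
  | case1 => simp [pvScanB]
  | case2 => simp [pvScanB]
  | case3 head rest' ih => simp [pvScanB]; omega
  | case4 rest' h => rw [pvScanB.eq_def]; simp
  | case5 head rest' h h2 ih => rw [pvScanB.eq_def]; simp [h, h2]; omega

def pvGoB : List Char → List Char
  | [] => []
  | c :: rest =>
    if c = '"' then
      let p := pvScanB rest
      List.replicate (p.1 + 1) ' ' ++ pvGoB p.2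
    else if c = '#' then []
    else c :: pvGoB rest
termination_by l => l.length
decreasing_by
  · have := pvScanB_len rest; simpa using Nat.lt_succ_of_le this
  · simp

def code_portion_py_alt (line : String) : String :=
  String.ofList (pvGoB line.toList)

-- ===== PRECONDITION & SPEC =====
def Spec_code_portion_py (line : String) (out : String) : Prop := out = code_portion_py_alt line
instance (line : String) (out : String) : Decidable (Spec_code_portion_py line out) := by unfold Spec_code_portion_py; infer_instance

-- ===== CLAIM (what is proved, stated in full; the proofs are below) =====
def Claim_equal_code_portion_py : Prop := ∀ (line : String), Dom_code_portion_py line → Spec_code_portion_py line (code_portion_py line)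

-- ===== LEMMAS AND PROOFS =====
theorem pvGoA_nil (inS esc : Bool) (acc : List Char) : pvGoA [] inS esc acc = acc := rfl

theorem pvGoA_cons (c : Char) (rest : List Char) (inS esc : Bool) (acc : List Char) :
    pvGoA (c :: rest) inS esc acc =
      if inS then
        if esc then pvGoA rest true false (acc ++ [' '])
        else if c = '\\' then pvGoA rest true true (acc ++ [' '])
        else if c = '"' then pvGoA rest false false (acc ++ [' '])
        else pvGoA rest true false (acc ++ [' '])
      else if c = '"' then pvGoA rest true false (acc ++ [' '])
      else if c = '#' then acc
      else pvGoA rest false false (acc ++ [c]) := rfl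

theorem pvGoB_nil : pvGoB [] = [] := by rw [pvGoB.eq_def]

theorem pvGoB_cons (c : Char) (rest : List Char) :
    pvGoB (c :: rest) =
      if c = '"' then List.replicate ((pvScanB rest).1 + 1) ' ' ++ pvGoB (pvScanB rest).2
      else if c = '#' then []
      else c :: pvGoB rest := by rw [pvGoB.eq_def]

theorem pvGoA_string : ∀ (l acc : List Char),
    pvGoA l true false acc = pvGoA (pvScanB l).2 false false (acc ++ List.replicate (pvScanB l).1 ' ') := by
  intro l
  induction l using pvScanB.induct with
  | case1 => intro acc; simp [pvScanB, pvGoA_nil]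
  | case2 => intro acc; simp [pvScanB, pvGoA_cons, pvGoA_nil, List.replicate_succ]
  | case3 head rest' ih =>
      intro acc
      simp [pvScanB, pvGoA_cons, ih, List.replicate_succ, List.append_assoc]
  | case4 rest' h =>
      intro acc
      rw [pvScanB.eq_def]
      simp [pvGoA_cons, List.replicate_succ]
  | case5 head rest' h h2 ih =>
      intro acc
      rw [pvScanB.eq_def]
      simp [pvGoA_cons, h, h2, ih, List.replicate_succ, List.append_assoc]

theorem pvGoA_eq : ∀ (l acc : List Char), pvGoA l false false acc = acc ++ pvGoB l := by
  intro l
  induction l using pvGoB.induct with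
  | case1 => intro acc; simp [pvGoA_nil, pvGoB_nil]
  | case2 rest' p ih =>
      intro acc
      rw [pvGoB_cons]
      simp only [pvGoA_cons, if_neg (by decide : ¬((false : Bool) = true)), if_true]
      rw [pvGoA_string, ih]
      simp only [List.replicate_succ, List.append_assoc, List.cons_append, List.nil_append]
      rfl
  | case3 rest' h =>
      intro acc
      rw [pvGoB_cons]
      simp [pvGoA_cons, h]
  | case4 head rest' h h2 ih =>
      intro acc
      rw [pvGoB_cons]
      simp [pvGoA_cons, h, h2, ih]

-- ===== VERDICT (by name: the statement is the Claim_ definition above) =====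
theorem code_portion_py_spec : Claim_equal_code_portion_py := by
  intro line _
  unfold Spec_code_portion_py code_portion_py code_portion_py_alt
  rw [pvGoA_eq]
  simp
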